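-- pv_equiv track=rewrite | github.com/EagleF6432614/stock-master | scripts/market_dashboard.py | _format_analysis_text
-- ===== SOURCE A (Python) =====
-- def _format_analysis_text(text: str) -> str:
--     """将分析文本格式化为 HTML（处理换行和列表）"""
--     if not text:
--         return ""
--     # Escape basic HTML
--     text = text.replace("&", "&amp;").replace("<", "&lt;").replace(">", "&gt;")
--     # Convert markdown-style lists
--     lines = text.split("\n")
--     result = []
--     in_list = False
--     for line in lines:
--         stripped = line.strip()
--         if stripped.startswith("- ") or stripped.startswith("* "):
--             if not in_list:
--                 result.append("<ul>")
--                 in_list = True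
--             result.append(f"<li>{stripped[2:]}</li>")
--         else:
--             if in_list:
--                 result.append("</ul>")
--                 in_list = False
--             if stripped:
--                 result.append(f"<p>{stripped}</p>")
--     if in_list:
--         result.append("</ul>")
--     return "\n".join(result)
-- ===== SOURCE B (Python) =====
-- from itertools import groupby
--
--
-- def _format_analysis_text(text: str) -> str:
--     """将分析文本格式化为 HTML（处理换行和列表）"""
--     if not text:
--         return ""
--     text = text.replace("&", "&amp;").replace("<", "&lt;").replace(">", "&gt;")
--     pieces = []
--     is_item = lambda ln: ln.strip().startswith(("- ", "* "))
--     for key, run in groupby(text.split("\n"), key=is_item):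
--         if key:
--             pieces.append("<ul>")
--             pieces.extend(f"<li>{ln.strip()[2:]}</li>" for ln in run)
--             pieces.append("</ul>")
--         else:
--             pieces.extend(f"<p>{s}</p>" for ln in run if (s := ln.strip()))
--     return "\n".join(pieces)
-- ===== Notes on version B (the rewrite author's own statement) =====
-- stated objective: alternative
-- what changed: B replaces A's stateful line loop with an in_list flag by first grouping the lines into maximal runs of list-item vs non-item lines (itertools.groupby) and rendering each run independently as a <ul> block or a sequence of <p> paragraphs.
import Mathlib
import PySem

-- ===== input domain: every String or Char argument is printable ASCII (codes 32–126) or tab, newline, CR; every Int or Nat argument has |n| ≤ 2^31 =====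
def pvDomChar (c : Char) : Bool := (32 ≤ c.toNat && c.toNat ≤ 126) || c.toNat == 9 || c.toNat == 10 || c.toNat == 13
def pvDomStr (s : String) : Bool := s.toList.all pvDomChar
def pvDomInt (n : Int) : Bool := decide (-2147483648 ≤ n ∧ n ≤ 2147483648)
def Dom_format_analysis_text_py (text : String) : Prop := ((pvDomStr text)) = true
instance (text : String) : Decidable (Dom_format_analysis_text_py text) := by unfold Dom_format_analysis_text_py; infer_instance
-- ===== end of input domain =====

-- B replaces A's stateful in_list flag by grouping the lines into maximal runs first (itertools.groupby); objective: simpler decomposition, same cost.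

-- shared by both sources: HTML-escape then split into lines (identical lines of Python in A and B)
-- text.split("\n"): sep is the nonempty literal "\n", so Chars.splitOn is exact here
def pvEscapeLines (text : String) : List String :=
  (PySem.Chars.splitOn
    (PySem.Str.replace (PySem.Str.replace (PySem.Str.replace text "&" "&amp;") "<" "&lt;") ">" "&gt;").toList
    ['\n']).map String.ofList

-- ===== PORT A =====
-- one iteration of A's for-loop: state = (result, in_list)
def pvStepA (st : List String × Bool) (line : String) : List String × Bool :=
  let stripped := PySem.Str.strip line
  if PySem.Str.startswith stripped "- " || PySem.Str.startswith stripped "* " then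
    ((if st.2 then st.1 else st.1 ++ ["<ul>"]) ++
       ["<li>" ++ PySem.Str.slice stripped (some 2) none ++ "</li>"], true)
  else
    ((if st.2 then st.1 ++ ["</ul>"] else st.1) ++
       (if stripped ≠ "" then ["<p>" ++ stripped ++ "</p>"] else []), false)

def format_analysis_text_py (text : String) : String :=
  if text = "" then ""
  else
    let lines := pvEscapeLines text
    let st := lines.foldl pvStepA ([], false)
    let result := if st.2 then st.1 ++ ["</ul>"] else st.1
    PySem.Str.join "\n" result

-- ===== PORT B =====
-- groupby key: does the stripped line start a list item?
def pvKey (line : String) : Bool :=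
  PySem.Str.startswith (PySem.Str.strip line) "- " || PySem.Str.startswith (PySem.Str.strip line) "* "

-- itertools.groupby(lines, key=pvKey): maximal runs of equal key, in order
def pvRuns (lines : List String) : List (Bool × List String) :=
  match lines with
  | [] => []
  | l :: ls =>
    match pvRuns ls with
    | (k', run) :: rest =>
        if pvKey l = k' then (k', l :: run) :: rest
        else (pvKey l, [l]) :: (k', run) :: rest
    | [] => [(pvKey l, [l])]

-- one groupby run rendered to its HTML pieces
def pvRender (g : Bool × List String) : List String :=
  if g.1 then
    "<ul>" ::
      g.2.map (fun l => "<li>" ++ PySem.Str.slice (PySem.Str.strip l) (some 2) none ++ "</li>")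
      ++ ["</ul>"]
  else
    g.2.filterMap (fun l =>
      let s := PySem.Str.strip l
      if s = "" then none else some ("<p>" ++ s ++ "</p>"))

def format_analysis_text_py_alt (text : String) : String :=
  if text = "" then ""
  else PySem.Str.join "\n" ((pvRuns (pvEscapeLines text)).flatMap pvRender)

-- ===== PRECONDITION & SPEC =====
def Spec_format_analysis_text_py (text : String) (out : String) : Prop := out = format_analysis_text_py_alt text
instance (text : String) (out : String) : Decidable (Spec_format_analysis_text_py text out) := by unfold Spec_format_analysis_text_py; infer_instance

-- ===== CLAIM (what is proved, stated in full; the proofs are below) =====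
def Claim_equal_format_analysis_text_py : Prop := ∀ (text : String), Dom_format_analysis_text_py text → Spec_format_analysis_text_py text (format_analysis_text_py text)

-- ===== LEMMAS AND PROOFS =====

-- the pieces A's loop still emits when entered with in_list = b and the remaining lines
def pvEmit : Bool → List String → List String
  | b, [] => if b then ["</ul>"] else []
  | b, l :: ls =>
    if pvKey l then
      (if b then [] else ["<ul>"]) ++
        ["<li>" ++ PySem.Str.slice (PySem.Str.strip l) (some 2) none ++ "</li>"] ++ pvEmit true ls
    else
      (if b then ["</ul>"] else []) ++
        (if PySem.Str.strip l ≠ "" then ["<p>" ++ PySem.Str.strip l ++ "</p>"] else []) ++ pvEmit false ls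

lemma pvFoldA (ls : List String) (acc : List String) (b : Bool) :
    (if (ls.foldl pvStepA (acc, b)).2 then (ls.foldl pvStepA (acc, b)).1 ++ ["</ul>"]
     else (ls.foldl pvStepA (acc, b)).1) = acc ++ pvEmit b ls := by
  induction ls generalizing acc b with
  | nil => cases b <;> simp [pvEmit]
  | cons l ls ih =>
    simp only [List.foldl_cons, pvStepA, pvEmit, pvKey]
    by_cases hcond : (PySem.Str.startswith (PySem.Str.strip l) "- "
        || PySem.Str.startswith (PySem.Str.strip l) "* ") = true
    · rw [if_pos hcond, if_pos hcond]
      cases b <;> (rw [ih]; simp [List.append_assoc])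
    · rw [if_neg hcond, if_neg hcond]
      cases b <;> (rw [ih]; simp [List.append_assoc])

-- what pvEmit b produces in terms of the runs of its argument
def pvCont : Bool → List (Bool × List String) → List String
  | false, rs => rs.flatMap pvRender
  | true, (true, run) :: rest =>
      run.map (fun l => "<li>" ++ PySem.Str.slice (PySem.Str.strip l) (some 2) none ++ "</li>")
        ++ "</ul>" :: rest.flatMap pvRender
  | true, rs => "</ul>" :: rs.flatMap pvRender

lemma pvEmit_runs (ls : List String) (b : Bool) : pvEmit b ls = pvCont b (pvRuns ls) := by
  induction ls generalizing b with
  | nil => cases b <;> simp [pvEmit, pvRuns, pvCont]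
  | cons l ls ih =>
    rcases hrs : pvRuns ls with _ | ⟨⟨k', run⟩, rest⟩ <;>
      cases hk : pvKey l <;> cases b <;> (try cases k') <;>
        simp [pvEmit, pvRuns, pvCont, pvRender, hk, hrs, ih] <;>
      (by_cases hl : PySem.Str.strip l = "" <;> simp [hl])

-- ===== VERDICT (by name: the statement is the Claim_ definition above) =====
theorem format_analysis_text_py_spec : Claim_equal_format_analysis_text_py := by
  intro text _
  show _ = _
  unfold format_analysis_text_py format_analysis_text_py_alt
  by_cases h : text = ""
  · simp [h]
  · simp only [if_neg h]
    rw [pvFoldA, pvEmit_runs, List.nil_append]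
    rfl
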